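-- pv_equiv track=rewrite | github.com/adilet0000/Data_Structure | insertion_sort.py | insertion_sort_evens
-- ===== SOURCE A (Python) =====
-- def insertion_sort_evens(arr):
--    even = [i for i in arr if i % 2 == 0]
--    even.sort()
--    j = 0
--    for i in range(len(arr)):
--       if arr[i] % 2 == 0:
--          arr[i] = even[j]
--          j += 1
--    return arr
-- ===== SOURCE B (Python) =====
-- def insertion_sort_evens(arr):
--    # Build the sorted list of evens by hand (insertion into a sorted list),
--    # then rebuild the result in one pass, consuming the sorted evens in order.
--    # Note: unlike A, this does not mutate arr in place; the RETURN value matches.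
--    sorted_evens = []
--    for v in arr:
--       if v % 2 == 0:
--          pos = 0
--          while pos < len(sorted_evens) and sorted_evens[pos] <= v:
--             pos += 1
--          sorted_evens.insert(pos, v)
--    res = []
--    for v in arr:
--       if v % 2 == 0:
--          res.append(sorted_evens.pop(0))
--       else:
--          res.append(v)
--    return res
-- ===== Notes on version B (the rewrite author's own statement) =====
-- stated objective: alternative
-- what changed: B replaces filter+builtin-sort+index-scatter over the mutated input with a hand-written insertion sort that builds the sorted evens list incrementally, then rebuilds a fresh result list in one pass consuming that list front-to-back (no in-place mutation; return value identical).
import Mathlib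
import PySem

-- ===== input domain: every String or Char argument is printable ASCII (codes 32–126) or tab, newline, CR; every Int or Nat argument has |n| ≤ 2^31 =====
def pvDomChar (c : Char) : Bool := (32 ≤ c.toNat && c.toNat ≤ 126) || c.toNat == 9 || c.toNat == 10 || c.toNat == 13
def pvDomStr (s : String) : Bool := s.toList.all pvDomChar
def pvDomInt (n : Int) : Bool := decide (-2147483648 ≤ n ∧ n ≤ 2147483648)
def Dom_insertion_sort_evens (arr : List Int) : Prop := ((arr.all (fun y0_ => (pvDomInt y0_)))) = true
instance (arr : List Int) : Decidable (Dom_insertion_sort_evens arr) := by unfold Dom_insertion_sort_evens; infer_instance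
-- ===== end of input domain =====

-- B replaces filter+builtin-sort+index-scatter with a hand-written insertion sort building the
-- sorted evens incrementally, then rebuilds a fresh list in one pass (A mutates arr in place and
-- returns it; B builds a new list — the equivalence proved here is about the RETURN value only).

-- ===== PORT A =====
-- the for-i loop writing even[j] into even slots; state (arr prefix done, j) rendered as the
-- remaining suffix and the not-yet-consumed tail of `even`
def pvFillA : List Int → List Int → List Int
  | [], _ => []
  | x :: xs, ev =>
    if PySem.Int.mod x 2 == 0 then ev.headD 0 :: pvFillA xs ev.tail
    else x :: pvFillA xs ev

def insertion_sort_evens (arr : List Int) : List Int :=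
  let even := arr.filter (fun i => PySem.Int.mod i 2 == 0)
  let even := PySem.List.sorted even (fun x => x) false
  pvFillA arr even

-- ===== PORT B =====
-- the inner while loop of Source B: walk past elements ≤ v, insert v there
def pvInsertPos (v : Int) : List Int → List Int
  | [] => [v]
  | x :: xs => if x ≤ v then x :: pvInsertPos v xs else v :: x :: xs

-- first pass of Source B: insertion-sort the evens into sorted_evens
def pvBuildSorted (arr : List Int) : List Int :=
  arr.foldl (fun s v => if PySem.Int.mod v 2 == 0 then pvInsertPos v s else s) []

-- second pass of Source B: rebuild, popping sorted_evens from the front at even slots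
def pvFillB : List Int → List Int → List Int
  | [], _ => []
  | x :: xs, s =>
    if PySem.Int.mod x 2 == 0 then
      match s with
      | [] => []          -- unreachable: sorted_evens holds exactly the evens of arr
      | e :: es => e :: pvFillB xs es
    else x :: pvFillB xs s

def insertion_sort_evens_alt (arr : List Int) : List Int :=
  pvFillB arr (pvBuildSorted arr)

-- ===== PRECONDITION & SPEC =====
def Spec_insertion_sort_evens (arr : List Int) (out : List Int) : Prop := out = insertion_sort_evens_alt arr
instance (arr : List Int) (out : List Int) : Decidable (Spec_insertion_sort_evens arr out) := by unfold Spec_insertion_sort_evens; infer_instance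

-- ===== CLAIM (what is proved, stated in full; the proofs are below) =====
def Claim_equal_insertion_sort_evens : Prop := ∀ (arr : List Int), Dom_insertion_sort_evens arr → Spec_insertion_sort_evens arr (insertion_sort_evens arr)

-- ===== LEMMAS AND PROOFS =====

theorem perm_insertPos (v : Int) (s : List Int) : (pvInsertPos v s).Perm (v :: s) := by
  induction s with
  | nil => simp [pvInsertPos]
  | cons x xs ih =>
    simp only [pvInsertPos]
    split
    · exact (ih.cons x).trans (List.Perm.swap v x xs)
    · exact List.Perm.refl _

theorem mem_insertPos (v y : Int) (s : List Int) : y ∈ pvInsertPos v s ↔ y = v ∨ y ∈ s := by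
  rw [(perm_insertPos v s).mem_iff]; simp

theorem pairwise_insertPos (v : Int) (s : List Int) (h : s.Pairwise (· ≤ ·)) :
    (pvInsertPos v s).Pairwise (· ≤ ·) := by
  induction s with
  | nil => simp [pvInsertPos]
  | cons x xs ih =>
    rw [List.pairwise_cons] at h
    simp only [pvInsertPos]
    split
    · rename_i hxv
      rw [List.pairwise_cons]
      refine ⟨?_, ih h.2⟩
      intro y hy
      rcases (mem_insertPos v y xs).1 hy with rfl | hy
      · exact hxv
      · exact h.1 y hy
    · rename_i hxv
      rw [List.pairwise_cons]
      refine ⟨?_, List.pairwise_cons.2 h⟩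
      intro y hy
      rcases List.mem_cons.1 hy with rfl | hy
      · omega
      · exact le_trans (by omega) (h.1 y hy)

theorem build_aux (xs : List Int) (s : List Int) (hs : s.Pairwise (· ≤ ·)) :
    (xs.foldl (fun s v => if PySem.Int.mod v 2 == 0 then pvInsertPos v s else s) s).Pairwise (· ≤ ·) ∧
    (xs.foldl (fun s v => if PySem.Int.mod v 2 == 0 then pvInsertPos v s else s) s).Perm
      (s ++ xs.filter (fun i => PySem.Int.mod i 2 == 0)) := by
  induction xs generalizing s with
  | nil => simpa using hs
  | cons x xs ih =>
    simp only [List.foldl_cons, List.filter_cons]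
    by_cases hx : (PySem.Int.mod x 2 == 0) = true
    · rw [if_pos hx, if_pos hx]
      obtain ⟨hp, hperm⟩ := ih (pvInsertPos x s) (pairwise_insertPos x s hs)
      refine ⟨hp, hperm.trans ?_⟩
      have h1 : (pvInsertPos x s ++ xs.filter (fun i => PySem.Int.mod i 2 == 0)).Perm
          ((x :: s) ++ xs.filter (fun i => PySem.Int.mod i 2 == 0)) :=
        (perm_insertPos x s).append_right _
      refine h1.trans ?_
      simpa using List.perm_middle.symm
    · rw [if_neg hx, if_neg hx]
      exact ih s hs

theorem pairwise_buildSorted (arr : List Int) : (pvBuildSorted arr).Pairwise (· ≤ ·) :=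
  (build_aux arr [] (by simp)).1

theorem perm_buildSorted (arr : List Int) :
    (pvBuildSorted arr).Perm (arr.filter (fun i => PySem.Int.mod i 2 == 0)) := by
  have h := (build_aux arr [] (by simp)).2
  rwa [List.nil_append] at h

theorem fill_eq (xs : List Int) (ev : List Int)
    (h : (xs.filter (fun i => PySem.Int.mod i 2 == 0)).length ≤ ev.length) :
    pvFillA xs ev = pvFillB xs ev := by
  induction xs generalizing ev with
  | nil => rfl
  | cons x xs ih =>
    rw [List.filter_cons] at h
    by_cases hx : (PySem.Int.mod x 2 == 0) = true
    · rw [if_pos hx] at h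
      cases ev with
      | nil => simp at h
      | cons e es =>
        simp only [pvFillA, pvFillB]
        rw [if_pos hx, if_pos hx]
        simp only [List.headD_cons, List.tail_cons]
        exact congrArg (e :: ·) (ih es (by simpa using h))
    · rw [if_neg hx] at h
      simp only [pvFillA, pvFillB]
      rw [if_neg hx, if_neg hx]
      exact congrArg (x :: ·) (ih ev h)

-- ===== VERDICT (by name: the statement is the Claim_ definition above) =====
theorem insertion_sort_evens_spec : Claim_equal_insertion_sort_evens := by
  intro arr _
  unfold Spec_insertion_sort_evens insertion_sort_evens insertion_sort_evens_alt
  have hsort : PySem.List.sorted (arr.filter (fun i => PySem.Int.mod i 2 == 0)) (fun x => x) false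
      = pvBuildSorted arr :=
    PySem.List.sorted_id_eq_of_perm_of_pairwise _ _ (perm_buildSorted arr) (pairwise_buildSorted arr)
  simp only [hsort]
  exact fill_eq arr (pvBuildSorted arr)
    (le_of_eq (perm_buildSorted arr).length_eq.symm)
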